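-- pv_equiv track=rewrite | github.com/rajat-kumar-mondal/proteinAnalysis2 | proteinAnalysis2.py | mol_formula
-- ===== SOURCE A (Python) =====
-- from collections import Counter
--
-- def mol_formula(protein_sequence):
--     amino_acid_composition = {
--         'A': {'C': 3, 'H': 7, 'N': 1, 'O': 2, 'S': 0},
--         'C': {'C': 3, 'H': 7, 'N': 1, 'O': 2, 'S': 1},
--         'D': {'C': 4, 'H': 7, 'N': 1, 'O': 4, 'S': 0},
--         'E': {'C': 5, 'H': 9, 'N': 1, 'O': 4, 'S': 0},
--         'F': {'C': 9, 'H': 11, 'N': 1, 'O': 2, 'S': 0},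
--         'G': {'C': 2, 'H': 5, 'N': 1, 'O': 2, 'S': 0},
--         'H': {'C': 6, 'H': 9, 'N': 3, 'O': 2, 'S': 0},
--         'I': {'C': 6, 'H': 13, 'N': 1, 'O': 2, 'S': 0},
--         'K': {'C': 6, 'H': 14, 'N': 2, 'O': 2, 'S': 0},
--         'L': {'C': 6, 'H': 13, 'N': 1, 'O': 2, 'S': 0},
--         'M': {'C': 5, 'H': 11, 'N': 1, 'O': 2, 'S': 1},
--         'N': {'C': 4, 'H': 8, 'N': 2, 'O': 3, 'S': 0},
--         'P': {'C': 5, 'H': 9, 'N': 1, 'O': 2, 'S': 0},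
--         'Q': {'C': 5, 'H': 10, 'N': 2, 'O': 3, 'S': 0},
--         'R': {'C': 6, 'H': 14, 'N': 4, 'O': 2, 'S': 0},
--         'S': {'C': 3, 'H': 7, 'N': 1, 'O': 3, 'S': 0},
--         'T': {'C': 4, 'H': 9, 'N': 1, 'O': 3, 'S': 0},
--         'V': {'C': 5, 'H': 11, 'N': 1, 'O': 2, 'S': 0},
--         'W': {'C': 11, 'H': 12, 'N': 2, 'O': 2, 'S': 0},
--         'Y': {'C': 9, 'H': 11, 'N': 1, 'O': 3, 'S': 0},
--         'B': {'C': 4, 'H': 7, 'N': 1, 'O': 3, 'S': 0},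
--         'J': {'C': 6, 'H': 13, 'N': 1, 'O': 2, 'S': 0},
--         'O': {'C': 5, 'H': 10, 'N': 2, 'O': 2, 'S': 0},
--         'U': {'C': 3, 'H': 7, 'N': 1, 'O': 2, 'S': 1},
--         'Z': {'C': 5, 'H': 10, 'N': 2, 'O': 3, 'S': 0}
--     }
--     composition = Counter()
--     for amino_acid in protein_sequence:
--         composition += Counter(amino_acid_composition.get(amino_acid, {}))
--     molecular_formula = ''.join(f"{element}{count}" for element, count in composition.items())
--     return molecular_formula
-- ===== SOURCE B (Python) =====
-- from collections import Counter
--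
-- _COMP = {
--     'A': (3, 7, 1, 2, 0), 'C': (3, 7, 1, 2, 1), 'D': (4, 7, 1, 4, 0),
--     'E': (5, 9, 1, 4, 0), 'F': (9, 11, 1, 2, 0), 'G': (2, 5, 1, 2, 0),
--     'H': (6, 9, 3, 2, 0), 'I': (6, 13, 1, 2, 0), 'K': (6, 14, 2, 2, 0),
--     'L': (6, 13, 1, 2, 0), 'M': (5, 11, 1, 2, 1), 'N': (4, 8, 2, 3, 0),
--     'P': (5, 9, 1, 2, 0), 'Q': (5, 10, 2, 3, 0), 'R': (6, 14, 4, 2, 0),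
--     'S': (3, 7, 1, 3, 0), 'T': (4, 9, 1, 3, 0), 'V': (5, 11, 1, 2, 0),
--     'W': (11, 12, 2, 2, 0), 'Y': (9, 11, 1, 3, 0), 'B': (4, 7, 1, 3, 0),
--     'J': (6, 13, 1, 2, 0), 'O': (5, 10, 2, 2, 0), 'U': (3, 7, 1, 2, 1),
--     'Z': (5, 10, 2, 3, 0),
-- }
--
-- def mol_formula(protein_sequence):
--     # count each residue once, then multiply its composition by its frequency
--     c = h = n = o = s = 0
--     for aa, k in Counter(protein_sequence).items():
--         t = _COMP.get(aa)
--         if t is not None: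
--             c += t[0] * k
--             h += t[1] * k
--             n += t[2] * k
--             o += t[3] * k
--             s += t[4] * k
--     if c == 0:
--         return ''
--     formula = 'C%dH%dN%dO%d' % (c, h, n, o)
--     if s > 0:
--         formula += 'S%d' % s
--     return formula
-- ===== Notes on version B (the rewrite author's own statement) =====
-- stated objective: faster
-- what changed: Instead of building a Counter of elements by Counter-adding (and positivity-filtering) a per-residue dict for every single character, B counts the residues once with Counter(sequence), accumulates five integer element totals over the distinct residues (composition times frequency), and formats the C/H/N/O[/S] string directly.
import Mathlib
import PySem

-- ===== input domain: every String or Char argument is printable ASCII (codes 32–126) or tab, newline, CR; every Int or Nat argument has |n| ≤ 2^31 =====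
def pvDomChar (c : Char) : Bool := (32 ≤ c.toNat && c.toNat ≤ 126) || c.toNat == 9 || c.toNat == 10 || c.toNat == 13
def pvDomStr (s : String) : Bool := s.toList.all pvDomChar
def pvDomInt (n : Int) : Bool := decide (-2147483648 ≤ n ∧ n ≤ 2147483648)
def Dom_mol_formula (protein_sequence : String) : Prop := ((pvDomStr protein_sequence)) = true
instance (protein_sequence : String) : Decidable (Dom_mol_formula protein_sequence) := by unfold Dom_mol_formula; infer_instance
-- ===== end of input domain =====

-- B replaces A's per-character Counter-addition loop by a count-once/multiply-per-distinct-residue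
-- pass over Counter(sequence).items() with five integer accumulators (objective: faster, measured).

-- ===== PORT A =====
-- Counter._keep_positive: delete the non-positive entries, order preserved
def pvKeepPositive (d : PySem.Dict String Int) : PySem.Dict String Int :=
  PySem.Dict.mk (d.items.filter (fun p => decide (0 < p.2)))

-- Counter.__iadd__: self[elem] = count + self[elem] for each item of other, then _keep_positive
def pvCounterIAdd (self other : PySem.Dict String Int) : PySem.Dict String Int :=
  pvKeepPositive (other.items.foldl (fun d p => d.insert p.1 (p.2 + d.getD p.1 0)) self)

def pvAATable : PySem.Dict Char (PySem.Dict String Int) :=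
  PySem.Dict.ofList [
    ('A', PySem.Dict.ofList [("C", 3), ("H", 7), ("N", 1), ("O", 2), ("S", 0)]),
    ('C', PySem.Dict.ofList [("C", 3), ("H", 7), ("N", 1), ("O", 2), ("S", 1)]),
    ('D', PySem.Dict.ofList [("C", 4), ("H", 7), ("N", 1), ("O", 4), ("S", 0)]),
    ('E', PySem.Dict.ofList [("C", 5), ("H", 9), ("N", 1), ("O", 4), ("S", 0)]),
    ('F', PySem.Dict.ofList [("C", 9), ("H", 11), ("N", 1), ("O", 2), ("S", 0)]),
    ('G', PySem.Dict.ofList [("C", 2), ("H", 5), ("N", 1), ("O", 2), ("S", 0)]),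
    ('H', PySem.Dict.ofList [("C", 6), ("H", 9), ("N", 3), ("O", 2), ("S", 0)]),
    ('I', PySem.Dict.ofList [("C", 6), ("H", 13), ("N", 1), ("O", 2), ("S", 0)]),
    ('K', PySem.Dict.ofList [("C", 6), ("H", 14), ("N", 2), ("O", 2), ("S", 0)]),
    ('L', PySem.Dict.ofList [("C", 6), ("H", 13), ("N", 1), ("O", 2), ("S", 0)]),
    ('M', PySem.Dict.ofList [("C", 5), ("H", 11), ("N", 1), ("O", 2), ("S", 1)]),
    ('N', PySem.Dict.ofList [("C", 4), ("H", 8), ("N", 2), ("O", 3), ("S", 0)]),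
    ('P', PySem.Dict.ofList [("C", 5), ("H", 9), ("N", 1), ("O", 2), ("S", 0)]),
    ('Q', PySem.Dict.ofList [("C", 5), ("H", 10), ("N", 2), ("O", 3), ("S", 0)]),
    ('R', PySem.Dict.ofList [("C", 6), ("H", 14), ("N", 4), ("O", 2), ("S", 0)]),
    ('S', PySem.Dict.ofList [("C", 3), ("H", 7), ("N", 1), ("O", 3), ("S", 0)]),
    ('T', PySem.Dict.ofList [("C", 4), ("H", 9), ("N", 1), ("O", 3), ("S", 0)]),
    ('V', PySem.Dict.ofList [("C", 5), ("H", 11), ("N", 1), ("O", 2), ("S", 0)]),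
    ('W', PySem.Dict.ofList [("C", 11), ("H", 12), ("N", 2), ("O", 2), ("S", 0)]),
    ('Y', PySem.Dict.ofList [("C", 9), ("H", 11), ("N", 1), ("O", 3), ("S", 0)]),
    ('B', PySem.Dict.ofList [("C", 4), ("H", 7), ("N", 1), ("O", 3), ("S", 0)]),
    ('J', PySem.Dict.ofList [("C", 6), ("H", 13), ("N", 1), ("O", 2), ("S", 0)]),
    ('O', PySem.Dict.ofList [("C", 5), ("H", 10), ("N", 2), ("O", 2), ("S", 0)]),
    ('U', PySem.Dict.ofList [("C", 3), ("H", 7), ("N", 1), ("O", 2), ("S", 1)]),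
    ('Z', PySem.Dict.ofList [("C", 5), ("H", 10), ("N", 2), ("O", 3), ("S", 0)])]

def mol_formula (protein_sequence : String) : String :=
  let composition := protein_sequence.toList.foldl
    (fun comp aa => pvCounterIAdd comp (pvAATable.getD aa PySem.Dict.empty))
    PySem.Dict.empty
  PySem.Str.join "" (composition.items.map (fun p => p.1 ++ PySem.Int.toStr p.2))

-- ===== PORT B =====
def pvCompTable : PySem.Dict Char (Int × Int × Int × Int × Int) :=
  PySem.Dict.ofList [
    ('A', (3, 7, 1, 2, 0)), ('C', (3, 7, 1, 2, 1)), ('D', (4, 7, 1, 4, 0)),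
    ('E', (5, 9, 1, 4, 0)), ('F', (9, 11, 1, 2, 0)), ('G', (2, 5, 1, 2, 0)),
    ('H', (6, 9, 3, 2, 0)), ('I', (6, 13, 1, 2, 0)), ('K', (6, 14, 2, 2, 0)),
    ('L', (6, 13, 1, 2, 0)), ('M', (5, 11, 1, 2, 1)), ('N', (4, 8, 2, 3, 0)),
    ('P', (5, 9, 1, 2, 0)), ('Q', (5, 10, 2, 3, 0)), ('R', (6, 14, 4, 2, 0)),
    ('S', (3, 7, 1, 3, 0)), ('T', (4, 9, 1, 3, 0)), ('V', (5, 11, 1, 2, 0)),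
    ('W', (11, 12, 2, 2, 0)), ('Y', (9, 11, 1, 3, 0)), ('B', (4, 7, 1, 3, 0)),
    ('J', (6, 13, 1, 2, 0)), ('O', (5, 10, 2, 2, 0)), ('U', (3, 7, 1, 2, 1)),
    ('Z', (5, 10, 2, 3, 0))]

def mol_formula_alt (protein_sequence : String) : String :=
  let totals := (PySem.Dict.counter protein_sequence.toList).items.foldl
    (fun t p =>
      match pvCompTable.get? p.1 with
      | some (a, b, c, d, e) =>
          (t.1 + a * p.2, t.2.1 + b * p.2, t.2.2.1 + c * p.2,
           t.2.2.2.1 + d * p.2, t.2.2.2.2 + e * p.2)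
      | none => t)
    ((0 : Int), (0 : Int), (0 : Int), (0 : Int), (0 : Int))
  if totals.1 = 0 then "" else
    let formula := "C" ++ PySem.Int.toStr totals.1 ++ "H" ++ PySem.Int.toStr totals.2.1
      ++ "N" ++ PySem.Int.toStr totals.2.2.1 ++ "O" ++ PySem.Int.toStr totals.2.2.2.1
    if 0 < totals.2.2.2.2 then formula ++ "S" ++ PySem.Int.toStr totals.2.2.2.2 else formula

-- ===== PRECONDITION & SPEC =====
def Spec_mol_formula (protein_sequence : String) (out : String) : Prop := out = mol_formula_alt protein_sequence
instance (protein_sequence : String) (out : String) : Decidable (Spec_mol_formula protein_sequence out) := by unfold Spec_mol_formula; infer_instance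

-- ===== CLAIM (what is proved, stated in full; the proofs are below) =====
def Claim_equal_mol_formula : Prop := ∀ (protein_sequence : String), Dom_mol_formula protein_sequence → Spec_mol_formula protein_sequence (mol_formula protein_sequence)

-- ===== LEMMAS AND PROOFS =====

-- per-residue weight vector (C,H,N,O,S), zero off the table
def wQ (x : Char) : Int × Int × Int × Int × Int := (pvCompTable.get? x).getD (0, 0, 0, 0, 0)

-- the shape A's Counter has after any prefix: keys C,H,N,O and then S (S only when positive)
def canonical (c h n o s : Int) : PySem.Dict String Int :=
  if c = 0 then PySem.Dict.empty
  else PySem.Dict.mk ([("C", c), ("H", h), ("N", n), ("O", o)] ++ (if 0 < s then [("S", s)] else []))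

def Good (c h n o s : Int) : Prop :=
  (c = 0 ∧ h = 0 ∧ n = 0 ∧ o = 0 ∧ s = 0) ∨ (0 < c ∧ 0 < h ∧ 0 < n ∧ 0 < o ∧ 0 ≤ s)

def pvValid : List Char :=
  ['A', 'C', 'D', 'E', 'F', 'G', 'H', 'I', 'K', 'L', 'M', 'N', 'P',
   'Q', 'R', 'S', 'T', 'V', 'W', 'Y', 'B', 'J', 'O', 'U', 'Z']

lemma charEntry (x : Char) :
    (pvAATable.getD x PySem.Dict.empty = PySem.Dict.empty ∧ wQ x = (0, 0, 0, 0, 0)) ∨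
    (pvAATable.getD x PySem.Dict.empty =
        PySem.Dict.mk [("C", (wQ x).1), ("H", (wQ x).2.1), ("N", (wQ x).2.2.1),
                       ("O", (wQ x).2.2.2.1), ("S", (wQ x).2.2.2.2)] ∧
      0 < (wQ x).1 ∧ 0 < (wQ x).2.1 ∧ 0 < (wQ x).2.2.1 ∧ 0 < (wQ x).2.2.2.1 ∧ 0 ≤ (wQ x).2.2.2.2) := by
  by_cases hx : x ∈ pvValid
  · fin_cases hx <;> exact Or.inr (by decide)
  · have h1 : pvAATable.get? x = none := by
      rw [PySem.Dict.get?_eq_none_iff_not_mem_keys]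
      rw [show pvAATable.keys = pvValid from rfl]; exact hx
    have h2 : pvCompTable.get? x = none := by
      rw [PySem.Dict.get?_eq_none_iff_not_mem_keys]
      rw [show pvCompTable.keys = pvValid from rfl]; exact hx
    exact Or.inl ⟨by simp [PySem.Dict.getD_eq_get?_getD, h1], by simp [wQ, h2]⟩

lemma canonical_congr {a1 a2 a3 a4 a5 b1 b2 b3 b4 b5 : Int} (h1 : a1 = b1) (h2 : a2 = b2)
    (h3 : a3 = b3) (h4 : a4 = b4) (h5 : a5 = b5) :
    canonical a1 a2 a3 a4 a5 = canonical b1 b2 b3 b4 b5 := by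
  rw [h1, h2, h3, h4, h5]

lemma stepValid (c h n o s c' h' n' o' s' : Int) (hG : Good c h n o s)
    (hc' : 0 < c') (hh' : 0 < h') (hn' : 0 < n') (ho' : 0 < o') (hs' : 0 ≤ s') :
    pvCounterIAdd (canonical c h n o s)
      (PySem.Dict.mk [("C", c'), ("H", h'), ("N", n'), ("O", o'), ("S", s')]) =
    canonical (c' + c) (h' + h) (n' + n) (o' + o) (s' + s) := by
  have h1 : 0 < c' + c ∧ 0 < h' + h ∧ 0 < n' + n ∧ 0 < o' + o := by
    rcases hG with ⟨rfl, rfl, rfl, rfl, rfl⟩ | ⟨hc, hh, hn, ho, _⟩ <;> omega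
  obtain ⟨h1, h2, h3, h4⟩ := h1
  rcases hG with ⟨rfl, rfl, rfl, rfl, rfl⟩ | ⟨hc, hh, hn, ho, hs⟩
  · simp only [add_zero]
    by_cases hps : 0 < s' <;>
      simp [pvCounterIAdd, pvKeepPositive, canonical, PySem.Dict.insert, PySem.Dict.getD,
        PySem.Dict.get?, PySem.Dict.empty, hc', hh', hn', ho', hps, hc'.ne']
  · rcases hs.lt_or_eq with hso | hso
    · have hss : 0 < s' + s := by omega
      simp [pvCounterIAdd, pvKeepPositive, canonical, PySem.Dict.insert, PySem.Dict.getD,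
        PySem.Dict.get?, h1, h2, h3, h4, hc.ne', h1.ne', hso, hss]
    · subst hso
      simp only [add_zero]
      by_cases hps : 0 < s' <;>
        simp [pvCounterIAdd, pvKeepPositive, canonical, PySem.Dict.insert, PySem.Dict.getD,
          PySem.Dict.get?, h1, h2, h3, h4, hc.ne', h1.ne', hps]

lemma stepEmpty (c h n o s : Int) (hG : Good c h n o s) :
    pvCounterIAdd (canonical c h n o s) PySem.Dict.empty = canonical c h n o s := by
  rcases hG with ⟨rfl, rfl, rfl, rfl, rfl⟩ | ⟨hc, hh, hn, ho, hs⟩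
  · simp [pvCounterIAdd, pvKeepPositive, canonical, PySem.Dict.empty]
  · rcases hs.lt_or_eq with hso | hso
    · simp [pvCounterIAdd, pvKeepPositive, canonical, PySem.Dict.empty, hc, hh, hn, ho, hso,
        hc.ne']
    · subst hso
      simp [pvCounterIAdd, pvKeepPositive, canonical, PySem.Dict.empty, hc, hh, hn, ho,
        hc.ne']

lemma aFold (l : List Char) (c h n o s : Int) (hG : Good c h n o s) :
    l.foldl (fun comp aa => pvCounterIAdd comp (pvAATable.getD aa PySem.Dict.empty))
      (canonical c h n o s) =
    canonical (c + (l.map (fun x => (wQ x).1)).sum) (h + (l.map (fun x => (wQ x).2.1)).sum)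
      (n + (l.map (fun x => (wQ x).2.2.1)).sum) (o + (l.map (fun x => (wQ x).2.2.2.1)).sum)
      (s + (l.map (fun x => (wQ x).2.2.2.2)).sum) := by
  induction l generalizing c h n o s with
  | nil => simp
  | cons x t ih =>
    rw [List.foldl_cons]
    rcases charEntry x with ⟨he, hw⟩ | ⟨he, hc', hh', hn', ho', hs'⟩
    · rw [he, stepEmpty c h n o s hG, ih c h n o s hG]
      simp [hw]
    · rw [he, stepValid c h n o s _ _ _ _ _ hG hc' hh' hn' ho' hs']
      have hG' : Good ((wQ x).1 + c) ((wQ x).2.1 + h) ((wQ x).2.2.1 + n)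
          ((wQ x).2.2.2.1 + o) ((wQ x).2.2.2.2 + s) := by
        rcases hG with ⟨rfl, rfl, rfl, rfl, rfl⟩ | ⟨h1, h2, h3, h4, h5⟩ <;>
          exact Or.inr ⟨by omega, by omega, by omega, by omega, by omega⟩
      rw [ih _ _ _ _ _ hG']
      simp only [List.map_cons, List.sum_cons]
      exact canonical_congr (by ring) (by ring) (by ring) (by ring) (by ring)

lemma sum_over_set (f : Char → Int) (l : List Char) :
    ((PySem.Set.ofList l).map (fun k => f k * l.count k)).sum = (l.map f).sum := by
  have hnd := PySem.Set.nodup_ofList (xs := l)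
  have hfs : (PySem.Set.ofList l).toFinset = l.toFinset := by
    ext k; simp [PySem.Set.mem_ofList]
  have h1 : ((PySem.Set.ofList l).map (fun k => f k * (l.count k : Int))).sum
      = ∑ k ∈ l.toFinset, f k * (l.count k : Int) := by
    rw [← List.sum_toFinset _ hnd, hfs]
  have h2 := Finset.sum_multiset_map_count (l : Multiset Char) f
  simp only [Multiset.map_coe, Multiset.sum_coe, Multiset.coe_count] at h2
  rw [h1, h2]
  exact Finset.sum_congr rfl (fun k _ => by rw [nsmul_eq_mul, mul_comm])

lemma foldB (L : List (Char × Int)) (t1 t2 t3 t4 t5 : Int) :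
    L.foldl
      (fun (t : Int × Int × Int × Int × Int) p =>
        match pvCompTable.get? p.1 with
        | some (a, b, c, d, e) =>
            (t.1 + a * p.2, t.2.1 + b * p.2, t.2.2.1 + c * p.2,
             t.2.2.2.1 + d * p.2, t.2.2.2.2 + e * p.2)
        | none => t)
      (t1, t2, t3, t4, t5) =
    (t1 + (L.map (fun p => (wQ p.1).1 * p.2)).sum,
     t2 + (L.map (fun p => (wQ p.1).2.1 * p.2)).sum,
     t3 + (L.map (fun p => (wQ p.1).2.2.1 * p.2)).sum,
     t4 + (L.map (fun p => (wQ p.1).2.2.2.1 * p.2)).sum,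
     t5 + (L.map (fun p => (wQ p.1).2.2.2.2 * p.2)).sum) := by
  induction L generalizing t1 t2 t3 t4 t5 with
  | nil => simp
  | cons p t ih =>
    rw [List.foldl_cons]
    rcases hg : pvCompTable.get? p.1 with _ | ⟨a, b, c, d, e⟩ <;>
      simp only [hg, wQ, List.map_cons, List.sum_cons, Option.getD_some, Option.getD_none] <;>
      rw [ih] <;> simp [wQ, add_assoc]

lemma bTotals (l : List Char) :
    (PySem.Dict.counter l).items.foldl
      (fun (t : Int × Int × Int × Int × Int) p =>
        match pvCompTable.get? p.1 with
        | some (a, b, c, d, e) =>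
            (t.1 + a * p.2, t.2.1 + b * p.2, t.2.2.1 + c * p.2,
             t.2.2.2.1 + d * p.2, t.2.2.2.2 + e * p.2)
        | none => t)
      ((0 : Int), (0 : Int), (0 : Int), (0 : Int), (0 : Int)) =
    ((l.map (fun x => (wQ x).1)).sum, (l.map (fun x => (wQ x).2.1)).sum,
     (l.map (fun x => (wQ x).2.2.1)).sum, (l.map (fun x => (wQ x).2.2.2.1)).sum,
     (l.map (fun x => (wQ x).2.2.2.2)).sum) := by
  rw [PySem.Dict.items_counter, foldB]
  simp [List.map_map, Function.comp_def, sum_over_set]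

lemma renderEq (c h n o s : Int) :
    PySem.Str.join "" ((canonical c h n o s).items.map (fun p => p.1 ++ PySem.Int.toStr p.2)) =
    (if c = 0 then "" else
      if 0 < s then
        "C" ++ PySem.Int.toStr c ++ "H" ++ PySem.Int.toStr h ++ "N" ++ PySem.Int.toStr n
          ++ "O" ++ PySem.Int.toStr o ++ "S" ++ PySem.Int.toStr s
      else
        "C" ++ PySem.Int.toStr c ++ "H" ++ PySem.Int.toStr h ++ "N" ++ PySem.Int.toStr n
          ++ "O" ++ PySem.Int.toStr o) := by
  by_cases hc : c = 0
  · simp [canonical, hc]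
    rfl
  · by_cases hs : 0 < s <;>
      · simp only [canonical, if_neg hc]
        rw [← String.toList_inj]
        simp [hs, PySem.Str.join, PySem.Chars.join, List.intercalate]

-- ===== VERDICT (by name: the statement is the Claim_ definition above) =====
theorem mol_formula_spec : Claim_equal_mol_formula := by
  intro ps _
  show mol_formula ps = mol_formula_alt ps
  simp only [mol_formula, mol_formula_alt]
  have h0 : List.foldl (fun comp aa => pvCounterIAdd comp (pvAATable.getD aa PySem.Dict.empty))
      PySem.Dict.empty ps.toList =
      canonical ((ps.toList.map (fun x => (wQ x).1)).sum) ((ps.toList.map (fun x => (wQ x).2.1)).sum)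
        ((ps.toList.map (fun x => (wQ x).2.2.1)).sum) ((ps.toList.map (fun x => (wQ x).2.2.2.1)).sum)
        ((ps.toList.map (fun x => (wQ x).2.2.2.2)).sum) := by
    have h := aFold ps.toList 0 0 0 0 0 (Or.inl ⟨rfl, rfl, rfl, rfl, rfl⟩)
    simp only [zero_add] at h
    exact h
  rw [bTotals, h0, renderEq]
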